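-- pv_equiv track=rewrite | github.com/Jerome-Celle/BricaBrac | sudoku.py | doublon
-- ===== SOURCE A (Python) =====
-- def doublon(match):
-- 	first = False
-- 	doublon = False
-- 	nbMatch = 0
-- 	for nb, value in match.items():
-- 		if first and value:
-- 			doublon = True
-- 		first = value or first
-- 		if(not doublon and value):
-- 			nbMatch = nb
-- 	if not doublon:
-- 		return nbMatch
-- 	else:
-- 		return 0
-- ===== SOURCE B (Python) =====
-- def doublon(match):
--     keys = [nb for nb, value in match.items() if value]
--     return keys[0] if len(keys) == 1 else 0
-- ===== Notes on version B (the rewrite author's own statement) =====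
-- stated objective: simpler
-- what changed: Replaces the single stateful pass maintaining first/doublon/nbMatch flags with a collect-then-decide shape: filter the truthy keys, then return the sole key if exactly one exists, else 0.
import Mathlib
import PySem

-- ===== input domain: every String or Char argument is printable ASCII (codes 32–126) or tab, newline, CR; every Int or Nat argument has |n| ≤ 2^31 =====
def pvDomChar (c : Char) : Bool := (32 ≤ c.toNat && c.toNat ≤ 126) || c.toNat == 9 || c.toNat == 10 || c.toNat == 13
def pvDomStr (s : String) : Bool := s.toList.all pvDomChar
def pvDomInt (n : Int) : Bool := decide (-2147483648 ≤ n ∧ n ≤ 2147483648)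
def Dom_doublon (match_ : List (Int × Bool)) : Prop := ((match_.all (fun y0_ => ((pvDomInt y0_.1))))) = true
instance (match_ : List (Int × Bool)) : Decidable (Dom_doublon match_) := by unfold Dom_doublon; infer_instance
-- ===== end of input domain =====

-- B replaces A's single stateful pass (first/doublon/nbMatch flags) with collect-the-truthy-keys
-- then decide on the collection's size; objective: simpler.

-- ===== PORT A =====
-- one loop step of A: state (first, doublon, nbMatch)
def doublonStep (st : Bool × Bool × Int) (kv : Int × Bool) : Bool × Bool × Int :=
  let d := if st.1 && kv.2 then true else st.2.1
  let f := kv.2 || st.1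
  let nm := if !d && kv.2 then kv.1 else st.2.2
  (f, d, nm)

def doublon (match_ : List (Int × Bool)) : Int :=
  let st := ((PySem.Dict.ofList match_).items).foldl doublonStep (false, false, 0)
  if !st.2.1 then st.2.2 else 0

-- ===== PORT B =====
def doublon_alt (match_ : List (Int × Bool)) : Int :=
  let keys := (((PySem.Dict.ofList match_).items).filter (fun kv => kv.2)).map (fun kv => kv.1)
  if keys.length = 1 then keys.headD 0 else 0

-- ===== PRECONDITION & SPEC =====
def Spec_doublon (match_ : List (Int × Bool)) (out : Int) : Prop := out = doublon_alt match_
instance (match_ : List (Int × Bool)) (out : Int) : Decidable (Spec_doublon match_ out) := by unfold Spec_doublon; infer_instance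

-- ===== CLAIM (what is proved, stated in full; the proofs are below) =====
def Claim_equal_doublon : Prop := ∀ (match_ : List (Int × Bool)), Dom_doublon match_ → Spec_doublon match_ (doublon match_)

-- ===== LEMMAS AND PROOFS =====

-- once doublon is true, the final answer is 0
lemma doublon_run_true (l : List (Int × Bool)) (f : Bool) (nm : Int) :
    (l.foldl doublonStep (f, true, nm)).2.1 = true := by
  induction l generalizing f nm with
  | nil => rfl
  | cons kv rest ih => simpa [doublonStep] using ih _ _

-- characterisation of A's loop from a doublon=false state
lemma doublon_run_false (l : List (Int × Bool)) (f : Bool) (nm : Int) :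
    (let st := l.foldl doublonStep (f, false, nm)
     if !st.2.1 then st.2.2 else 0) =
    (match (l.filter (fun kv => kv.2)).map (fun kv => kv.1) with
     | [] => nm
     | [k] => if f then 0 else k
     | _ => 0) := by
  induction l generalizing f nm with
  | nil => rfl
  | cons kv rest ih =>
    rcases kv with ⟨k, v⟩
    cases v with
    | false => simpa [doublonStep] using ih f nm
    | true =>
      cases f with
      | false =>
        have h := ih true k
        simp only [List.foldl_cons, List.filter_cons,
          show doublonStep (false, false, nm) (k, true) = (true, false, k) from rfl] at *
        rw [h]
        rcases hks : (rest.filter (fun kv => kv.2)).map (fun kv => kv.1) with _ | ⟨a, _ | ⟨b, t⟩⟩ <;> simp [hks]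
      | true =>
        have h0 := doublon_run_true rest true nm
        simp only [List.foldl_cons, List.filter_cons,
          show doublonStep (true, false, nm) (k, true) = (true, true, nm) from rfl] at *
        simp only [h0, Bool.not_true]
        rcases hks : (rest.filter (fun kv => kv.2)).map (fun kv => kv.1) with _ | ⟨a, t⟩ <;>
          simp [hks]

-- ===== VERDICT (by name: the statement is the Claim_ definition above) =====
theorem doublon_spec : Claim_equal_doublon := by
  intro match_ _
  unfold Spec_doublon doublon doublon_alt
  rw [doublon_run_false]
  rcases hks : (((PySem.Dict.ofList match_).items).filter (fun kv => kv.2)).map (fun kv => kv.1) with _ | ⟨a, _ | ⟨b, t⟩⟩ <;> simp [hks]
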